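-- pv_equiv track=rewrite | github.com/lazymooseai/TH-Agent-v7-px | app.py | tunnista_erikoispeli
-- ===== SOURCE A (Python) =====
-- def tunnista_erikoispeli(koti: str, vieras: str, tournament: str = "") -> list:
--     tags = []
--     kl, vl, tl = koti.lower(), vieras.lower(), tournament.lower()
--     helsinki_osumia = sum(1 for j in ["hifk", "jokerit", "kiekko-espoo", "blues", "kiekko-vantaa"] if j in kl or j in vl)
--
--     if helsinki_osumia >= 2: tags.append("<span class='badge-fire'>🔥 PAIKALLISPELI</span>")
--     if any(kw in tl for kw in ["playoff", "pudotus"]): tags.append("<span class='badge-gold'>🏆 PLAYOFFS</span>")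
--     elif any(kw in tl for kw in ["cup", "kansallinen"]): tags.append("<span class='badge-gold'>🥇 CUP</span>")
--     elif any(kw in tl for kw in ["champions"]): tags.append("<span class='badge-gold'>⭐ CHAMPIONS LEAGUE</span>")
--     elif any(kw in tl for kw in ["mm", "world"]): tags.append("<span class='badge-gold'>🌍 MM-OTTELU</span>")
--     return tags
-- ===== SOURCE B (Python) =====
-- _HELSINKI = ["hifk", "jokerit", "kiekko-espoo", "blues", "kiekko-vantaa"]
--
-- # flat keyword -> priority map; priority indexes into _GOLD
-- _KW_PRIO = [("playoff", 0), ("pudotus", 0), ("cup", 1), ("kansallinen", 1),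
--             ("champions", 2), ("mm", 3), ("world", 3)]
--
-- _GOLD = ["<span class='badge-gold'>\U0001F3C6 PLAYOFFS</span>",
--          "<span class='badge-gold'>\U0001F947 CUP</span>",
--          "<span class='badge-gold'>\u2B50 CHAMPIONS LEAGUE</span>",
--          "<span class='badge-gold'>\U0001F30D MM-OTTELU</span>"]
--
-- def tunnista_erikoispeli(koti: str, vieras: str, tournament: str = "") -> list:
--     kl, vl, tl = koti.lower(), vieras.lower(), tournament.lower()
--     tags = []
--     if len([j for j in _HELSINKI if j in kl or j in vl]) >= 2:
--         tags.append("<span class='badge-fire'>\U0001F525 PAIKALLISPELI</span>")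
--     hits = [p for kw, p in _KW_PRIO if kw in tl]
--     if hits:
--         tags.append(_GOLD[min(hits)])
--     return tags
-- ===== Notes on version B (the rewrite author's own statement) =====
-- stated objective: alternative
-- what changed: Replaces A's four-way elif chain over keyword groups by a flat keyword-to-priority map: B collects the priorities of all matching keywords in one comprehension and, if any matched, appends the tag indexed by the minimum priority (min-priority = A's first elif branch taken); the helsinki count becomes a filtered-list length.
import Mathlib
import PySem

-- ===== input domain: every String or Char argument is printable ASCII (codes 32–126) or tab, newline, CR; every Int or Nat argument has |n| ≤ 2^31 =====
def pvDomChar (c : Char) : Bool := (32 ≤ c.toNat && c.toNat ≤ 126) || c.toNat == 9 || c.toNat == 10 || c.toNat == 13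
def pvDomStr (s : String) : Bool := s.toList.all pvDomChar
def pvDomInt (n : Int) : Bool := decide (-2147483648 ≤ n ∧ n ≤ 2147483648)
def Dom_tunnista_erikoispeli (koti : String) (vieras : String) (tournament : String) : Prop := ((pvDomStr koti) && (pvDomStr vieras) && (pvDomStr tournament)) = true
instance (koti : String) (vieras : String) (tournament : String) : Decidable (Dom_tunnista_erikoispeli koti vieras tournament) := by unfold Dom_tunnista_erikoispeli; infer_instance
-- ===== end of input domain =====

-- B replaces A's elif chain by a flat keyword→priority map: it collects the priorities of ALL matching keywords and tags with the minimum one (objective: alternative decomposition, same cost).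

-- ===== PORT A =====
def tunnista_erikoispeli (koti : String) (vieras : String) (tournament : String) : List String :=
  let tags : List String := []
  let kl := PySem.Str.lower koti
  let vl := PySem.Str.lower vieras
  let tl := PySem.Str.lower tournament
  -- sum(1 for j in [...] if j in kl or j in vl)
  let helsinki_osumia : Int :=
    (["hifk", "jokerit", "kiekko-espoo", "blues", "kiekko-vantaa"]).foldl
      (fun acc j => if PySem.Str.isIn j kl || PySem.Str.isIn j vl then acc + 1 else acc) 0
  let tags := if helsinki_osumia ≥ 2 then tags ++ ["<span class='badge-fire'>🔥 PAIKALLISPELI</span>"] else tags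
  if (["playoff", "pudotus"]).any (fun kw => PySem.Str.isIn kw tl) then
    tags ++ ["<span class='badge-gold'>🏆 PLAYOFFS</span>"]
  else if (["cup", "kansallinen"]).any (fun kw => PySem.Str.isIn kw tl) then
    tags ++ ["<span class='badge-gold'>🥇 CUP</span>"]
  else if (["champions"]).any (fun kw => PySem.Str.isIn kw tl) then
    tags ++ ["<span class='badge-gold'>⭐ CHAMPIONS LEAGUE</span>"]
  else if (["mm", "world"]).any (fun kw => PySem.Str.isIn kw tl) then
    tags ++ ["<span class='badge-gold'>🌍 MM-OTTELU</span>"]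
  else tags

-- ===== PORT B =====
def pvHelsinki : List String := ["hifk", "jokerit", "kiekko-espoo", "blues", "kiekko-vantaa"]

def pvKwPrio : List (String × Int) :=
  [("playoff", 0), ("pudotus", 0), ("cup", 1), ("kansallinen", 1),
   ("champions", 2), ("mm", 3), ("world", 3)]

def pvGold : List String :=
  ["<span class='badge-gold'>🏆 PLAYOFFS</span>",
   "<span class='badge-gold'>🥇 CUP</span>",
   "<span class='badge-gold'>⭐ CHAMPIONS LEAGUE</span>",
   "<span class='badge-gold'>🌍 MM-OTTELU</span>"]

def tunnista_erikoispeli_alt (koti : String) (vieras : String) (tournament : String) : List String :=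
  let kl := PySem.Str.lower koti
  let vl := PySem.Str.lower vieras
  let tl := PySem.Str.lower tournament
  let tags : List String :=
    if (pvHelsinki.filter (fun j => PySem.Str.isIn j kl || PySem.Str.isIn j vl)).length ≥ 2 then
      ["<span class='badge-fire'>🔥 PAIKALLISPELI</span>"]
    else []
  -- hits = [p for kw, p in _KW_PRIO if kw in tl];  if hits: tags.append(_GOLD[min(hits)])
  let hits := (pvKwPrio.filter (fun kv => PySem.Str.isIn kv.1 tl)).map Prod.snd
  match PySem.List.min? hits (fun p => p) with
  | none => tags
  | some m => tags ++ [PySem.List.pyGetD pvGold m ""]  -- _GOLD[m]; m is always 0..3, in range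

-- ===== PRECONDITION & SPEC =====
def Spec_tunnista_erikoispeli (koti : String) (vieras : String) (tournament : String) (out : List String) : Prop := out = tunnista_erikoispeli_alt koti vieras tournament
instance (koti : String) (vieras : String) (tournament : String) (out : List String) : Decidable (Spec_tunnista_erikoispeli koti vieras tournament out) := by unfold Spec_tunnista_erikoispeli; infer_instance

-- ===== CLAIM (what is proved, stated in full; the proofs are below) =====
def Claim_equal_tunnista_erikoispeli : Prop := ∀ (koti : String) (vieras : String) (tournament : String), Dom_tunnista_erikoispeli koti vieras tournament → Spec_tunnista_erikoispeli koti vieras tournament (tunnista_erikoispeli koti vieras tournament)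

-- ===== LEMMAS AND PROOFS =====
-- A's conditional-increment count equals B's filter length, as integers
theorem pv_count_eq_filter_length (p : String → Bool) (l : List String) (n : Int) :
    l.foldl (fun acc j => if p j then acc + 1 else acc) n = n + (l.filter p).length := by
  induction l generalizing n with
  | nil => simp
  | cons x xs ih =>
      by_cases h : p x
      · simp [h, ih]; ring
      · simp [h, ih]

-- ===== VERDICT (by name: the statement is the Claim_ definition above) =====
set_option maxHeartbeats 4000000 in
theorem tunnista_erikoispeli_spec : Claim_equal_tunnista_erikoispeli := by
  intro koti vieras tournament _
  unfold Spec_tunnista_erikoispeli tunnista_erikoispeli tunnista_erikoispeli_alt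
  simp only [pvKwPrio, pvGold, pvHelsinki,
    pv_count_eq_filter_length (fun j => PySem.Str.isIn j (PySem.Str.lower koti) || PySem.Str.isIn j (PySem.Str.lower vieras))]
  set tl := PySem.Str.lower tournament with htl
  by_cases h1 : PySem.Str.isIn "playoff" tl <;>
  by_cases h2 : PySem.Str.isIn "pudotus" tl <;>
  by_cases h3 : PySem.Str.isIn "cup" tl <;>
  by_cases h4 : PySem.Str.isIn "kansallinen" tl <;>
  by_cases h5 : PySem.Str.isIn "champions" tl <;>
  by_cases h6 : PySem.Str.isIn "mm" tl <;>
  by_cases h7 : PySem.Str.isIn "world" tl <;>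
    (simp at h1 h2 h3 h4 h5 h6 h7;
     simp [h1, h2, h3, h4, h5, h6, h7, PySem.List.min?, PySem.List.pyGetD, PySem.List.pyGet?, PySem.List.pyIdx?])
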